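-- pv_equiv track=rewrite | github.com/SeraphWedd/CodeChef_Codes-Python-3.x- | beginner/COPS.py | safehouse
-- ===== SOURCE A (Python) =====
-- def safehouse(a, x, y):
--     safe = [i for i in range(1, 101)]
--     d = x*y
--     for w in a:
--         lower = w-d - 1
--         upper = w+d - 1
--         if lower < 0:
--             lower = 0
--         if upper > 99:
--             upper = 99
--         for r in range(lower, upper + 1):
--             safe[r] = 0
--     return 100 - safe.count(0)
-- ===== SOURCE B (Python) =====
-- def safehouse(a, x, y):
--     # Difference array over the 100 houses: mark interval endpoints once per cop,
--     # then one prefix-sum sweep counts the uncovered houses.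
--     d = x * y
--     diff = [0] * 101
--     for w in a:
--         lo = w - d - 1
--         hi = w + d - 1
--         if lo < 0:
--             lo = 0
--         if hi > 99:
--             hi = 99
--         if lo <= hi:
--             diff[lo] += 1
--             diff[hi + 1] -= 1
--     cur = 0
--     safe = 0
--     for j in range(100):
--         cur += diff[j]
--         if cur == 0:
--             safe += 1
--     return safe
-- ===== Notes on version B (the rewrite author's own statement) =====
-- stated objective: faster
-- what changed: Replaces A's per-cop inner loop that zeroes every covered slot of a 100-element list (re-scanned by count at the end) with a difference array: each cop marks two interval endpoints, and a single prefix-sum sweep over the 100 slots counts the uncovered houses.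
import Mathlib
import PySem

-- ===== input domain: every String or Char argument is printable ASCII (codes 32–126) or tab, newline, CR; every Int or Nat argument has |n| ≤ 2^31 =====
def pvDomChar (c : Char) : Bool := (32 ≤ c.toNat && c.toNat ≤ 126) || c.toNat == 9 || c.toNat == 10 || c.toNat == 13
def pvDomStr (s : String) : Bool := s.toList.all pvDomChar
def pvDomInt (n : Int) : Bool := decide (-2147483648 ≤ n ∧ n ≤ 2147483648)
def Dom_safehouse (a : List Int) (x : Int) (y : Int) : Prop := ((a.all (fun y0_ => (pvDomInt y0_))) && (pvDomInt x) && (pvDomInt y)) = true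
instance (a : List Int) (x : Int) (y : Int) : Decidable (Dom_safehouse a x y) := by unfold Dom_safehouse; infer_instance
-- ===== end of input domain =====

-- B replaces A's per-cop slot-zeroing pass over a 100-element list with a difference
-- array (two endpoint marks per cop) and one prefix-sum sweep.

-- ===== PORT A =====
-- Literal port of A: safe = [1..100]; each cop zeroes every slot of its clamped
-- range (those indices are always in [0,99], so pySetD is exact for safe[r]=0);
-- return 100 - safe.count(0).
def safehouse (a : List Int) (x : Int) (y : Int) : Int :=
  let safe : List Int := PySem.List.pyRange 1 101 1
  let d := x * y
  let safe := a.foldl (fun safe w =>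
    let lower := w - d - 1
    let upper := w + d - 1
    let lower := if lower < 0 then 0 else lower
    let upper := if upper > 99 then 99 else upper
    (PySem.List.pyRange lower (upper + 1) 1).foldl
      (fun s r => PySem.List.pySetD s r (0 : Int)) safe) safe
  100 - (PySem.List.count safe 0 : Int)

-- ===== PORT B =====
-- Literal port of B (Source B): difference array of 101 zeros, two endpoint marks per
-- cop (those indices are always in [0,100], so pyGetD/pySetD are exact for
-- diff[lo]+=1 / diff[hi+1]-=1), then one prefix-sum sweep over range(100)
-- counting the slots with zero coverage.
def safehouse_alt (a : List Int) (x : Int) (y : Int) : Int :=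
  let d := x * y
  let diff : List Int := List.replicate 101 0
  let diff := a.foldl (fun diff w =>
    let lo := w - d - 1
    let hi := w + d - 1
    let lo := if lo < 0 then 0 else lo
    let hi := if hi > 99 then 99 else hi
    if lo ≤ hi then
      let diff' := PySem.List.pySetD diff lo (PySem.List.pyGetD diff lo 0 + 1)
      PySem.List.pySetD diff' (hi + 1) (PySem.List.pyGetD diff' (hi + 1) 0 - 1)
    else diff) diff
  let p := (PySem.List.pyRange 0 100 1).foldl
    (fun (p : Int × Int) j =>
      let cur := p.1 + PySem.List.pyGetD diff j 0
      (cur, if cur = 0 then p.2 + 1 else p.2)) ((0 : Int), (0 : Int))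
  p.2

-- ===== PRECONDITION & SPEC =====
def Spec_safehouse (a : List Int) (x : Int) (y : Int) (out : Int) : Prop := out = safehouse_alt a x y
instance (a : List Int) (x : Int) (y : Int) (out : Int) : Decidable (Spec_safehouse a x y out) := by unfold Spec_safehouse; infer_instance

-- ===== CLAIM (what is proved, stated in full; the proofs are below) =====
def Claim_equal_safehouse : Prop := ∀ (a : List Int) (x : Int) (y : Int), Dom_safehouse a x y → Spec_safehouse a x y (safehouse a x y)

-- ===== LEMMAS AND PROOFS =====

-- does cop w (with range radius d) cover 0-based house slot r?
def pvCov (d r w : Int) : Bool := decide (w - d - 1 ≤ r ∧ r ≤ w + d - 1)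

-- a slot list of length n described by a function of the (Int-cast) index
def pvMk (n : Nat) (f : Int → Int) : List Int := (List.range n).map (fun k : Nat => f (k : Int))

-- per-cop contribution to the difference array at index j
def pvDelta (d w j : Int) : Int :=
  if max (w - d - 1) 0 ≤ min (w + d - 1) 99 then
    (if j = max (w - d - 1) 0 then 1 else 0) - (if j = min (w + d - 1) 99 + 1 then 1 else 0)
  else 0

-- total difference-array value at index j
def pvC (d : Int) (a : List Int) (j : Int) : Int := (a.map (fun w => pvDelta d w j)).sum

-- prefix sum of a slot function over indices 0..n-1
def pvS (g : Int → Int) (n : Nat) : Int := ((List.range n).map (fun k : Nat => g (k : Int))).sum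

lemma pvMk_ext {n : Nat} {f g : Int → Int}
    (h : ∀ k : Nat, k < n → f (k : Int) = g (k : Int)) : pvMk n f = pvMk n g := by
  unfold pvMk
  refine List.map_congr_left ?_
  intro k hk
  exact h k (List.mem_range.mp hk)

lemma pvMk_set {n : Nat} (f : Int → Int) (j : Nat) (v : Int) :
    (pvMk n f).set j v = pvMk n (fun r => if r = (j : Int) then v else f r) := by
  apply List.ext_getElem
  · simp [pvMk]
  · intro k h1 h2
    simp only [pvMk, List.getElem_set, List.getElem_map, List.getElem_range]
    by_cases hk : j = k
    · simp [hk]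
    · have : ¬((k : Int) = (j : Int)) := by omega
      simp [hk, this]

lemma pvMk_pyGetD {n : Nat} (f : Int → Int) (i : Int) (d : Int) (h0 : 0 ≤ i) (h1 : i < (n : Int)) :
    PySem.List.pyGetD (pvMk n f) i d = f i := by
  rw [PySem.List.pyGetD_eq_getElem _ _ h0 (by simp [pvMk]; omega)]
  simp only [pvMk, List.getElem_map, List.getElem_range]
  congr 1
  omega

lemma pvSumInd (t : Int) (n : Nat) :
    ((List.range n).map (fun j : Nat => if (j : Int) = t then (1 : Int) else 0)).sum
    = if 0 ≤ t ∧ t < (n : Int) then 1 else 0 := by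
  induction n with
  | zero => rw [if_neg (by omega)]; simp
  | succ m ih =>
    rw [List.range_succ, List.map_append, List.sum_append, ih]
    simp only [List.map_cons, List.map_nil, List.sum_cons, List.sum_nil]
    by_cases h : (m : Int) = t
    · rw [if_pos h, if_neg (by omega), if_pos (by omega)]; ring
    · rw [if_neg h]
      split_ifs <;> omega

lemma pvSumSub {α : Type} (l : List α) (u v : α → Int) :
    (l.map (fun j => u j - v j)).sum = (l.map u).sum - (l.map v).sum := by
  induction l with
  | nil => simp
  | cons w l ih => simp [ih]; ring

-- inner loop of A zeroes all slots in [lo, hi]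
lemma pvInner : ∀ (n : Nat) (lo hi : Int), (hi + 1 - lo).toNat = n → 0 ≤ lo → hi ≤ 99 →
    ∀ f : Int → Int,
    (PySem.List.pyRange lo (hi + 1) 1).foldl
      (fun s r => PySem.List.pySetD s r (0 : Int)) (pvMk 100 f)
    = pvMk 100 (fun r => if lo ≤ r ∧ r ≤ hi then 0 else f r) := by
  intro n
  induction n with
  | zero =>
    intro lo hi hn hlo hhi f
    rw [PySem.List.pyRange_one_eq_nil (by omega)]
    exact pvMk_ext (fun k hk => by rw [if_neg (by omega)])
  | succ m ih =>
    intro lo hi hn hlo hhi f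
    rw [PySem.List.pyRange_one_cons (by omega)]
    simp only [List.foldl_cons]
    rw [PySem.List.pySetD_of_nonneg _ _ hlo, pvMk_set,
        ih (lo + 1) hi (by omega) (by omega) hhi]
    refine pvMk_ext (fun k hk => ?_)
    have hcast : ((lo.toNat : Nat) : Int) = lo := Int.toNat_of_nonneg hlo
    rw [hcast]
    split_ifs <;> first | rfl | omega

-- A's fold over the cop list marks exactly the covered slots
lemma pvAfold (d : Int) (a : List Int) (f : Int → Int) :
    a.foldl (fun safe w =>
      let lower := w - d - 1
      let upper := w + d - 1
      let lower := if lower < 0 then 0 else lower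
      let upper := if upper > 99 then 99 else upper
      (PySem.List.pyRange lower (upper + 1) 1).foldl
        (fun s r => PySem.List.pySetD s r (0 : Int)) safe) (pvMk 100 f)
    = pvMk 100 (fun r => if a.any (pvCov d r) then 0 else f r) := by
  induction a generalizing f with
  | nil => exact (pvMk_ext (fun k hk => by simp)).symm
  | cons w a ih =>
    simp only [List.foldl_cons]
    rw [pvInner _ _ _ rfl (by split_ifs <;> omega) (by split_ifs <;> omega) f, ih]
    refine pvMk_ext (fun k hk => ?_)
    have hcov : ((if w - d - 1 < 0 then 0 else w - d - 1) ≤ (k : Int) ∧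
        (k : Int) ≤ (if w + d - 1 > 99 then 99 else w + d - 1)) ↔ pvCov d (k : Int) w = true := by
      simp only [pvCov, decide_eq_true_eq]
      split_ifs <;> omega
    simp only [List.any_cons, Bool.or_eq_true]
    by_cases hcv : pvCov d (k : Int) w = true
    · by_cases han : a.any (pvCov d (k : Int)) = true
      · rw [if_pos han, if_pos (Or.inl hcv)]
      · rw [if_neg han, if_pos (hcov.mpr hcv), if_pos (Or.inl hcv)]
    · by_cases han : a.any (pvCov d (k : Int)) = true
      · rw [if_pos han, if_pos (Or.inr han)]
      · rw [if_neg han, if_neg (fun hc => hcv (hcov.mp hc)),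
            if_neg (fun hor => hor.elim hcv han)]

-- B's fold over the cop list builds the difference array
lemma pvBfold (d : Int) (a : List Int) (f : Int → Int) :
    a.foldl (fun diff w =>
      let lo := w - d - 1
      let hi := w + d - 1
      let lo := if lo < 0 then 0 else lo
      let hi := if hi > 99 then 99 else hi
      if lo ≤ hi then
        let diff' := PySem.List.pySetD diff lo (PySem.List.pyGetD diff lo 0 + 1)
        PySem.List.pySetD diff' (hi + 1) (PySem.List.pyGetD diff' (hi + 1) 0 - 1)
      else diff) (pvMk 101 f)
    = pvMk 101 (fun j => f j + pvC d a j) := by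
  induction a generalizing f with
  | nil => exact (pvMk_ext (fun k hk => by simp [pvC])).symm
  | cons w a ih =>
    simp only [List.foldl_cons]
    have hstep :
        (let lo := w - d - 1
         let hi := w + d - 1
         let lo := if lo < 0 then 0 else lo
         let hi := if hi > 99 then 99 else hi
         if lo ≤ hi then
           let diff' := PySem.List.pySetD (pvMk 101 f) lo (PySem.List.pyGetD (pvMk 101 f) lo 0 + 1)
           PySem.List.pySetD diff' (hi + 1) (PySem.List.pyGetD diff' (hi + 1) 0 - 1)
         else pvMk 101 f)
        = pvMk 101 (fun j => f j + pvDelta d w j) := by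
      simp only []
      set lo := if w - d - 1 < 0 then 0 else w - d - 1 with hlo
      set hi := if w + d - 1 > 99 then 99 else w + d - 1 with hhi
      have hlo0 : 0 ≤ lo := by rw [hlo]; split_ifs <;> omega
      have hhi99 : hi ≤ 99 := by rw [hhi]; split_ifs <;> omega
      have hlomax : lo = max (w - d - 1) 0 := by rw [hlo]; split_ifs <;> omega
      have hhimin : hi = min (w + d - 1) 99 := by rw [hhi]; split_ifs <;> omega
      by_cases hc : lo ≤ hi
      · simp only [if_pos hc]
        rw [pvMk_pyGetD f lo 0 hlo0 (by omega),
            PySem.List.pySetD_of_nonneg _ _ hlo0, pvMk_set]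
        have hcast : ((lo.toNat : Nat) : Int) = lo := Int.toNat_of_nonneg hlo0
        rw [pvMk_pyGetD _ (hi + 1) 0 (by omega) (by omega),
            PySem.List.pySetD_of_nonneg _ _ (by omega : (0:Int) ≤ hi + 1), pvMk_set]
        have hcast2 : (((hi + 1).toNat : Nat) : Int) = hi + 1 := Int.toNat_of_nonneg (by omega)
        refine pvMk_ext (fun k hk => ?_)
        rw [hcast, hcast2]
        rw [if_neg (show ¬ (hi + 1 = lo) by omega)]
        simp only [pvDelta, ← hlomax, ← hhimin, if_pos hc]
        by_cases h1 : (k : Int) = hi + 1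
        · rw [if_pos h1, if_neg (show ¬ (k : Int) = lo by omega), if_pos h1, h1]
          ring
        · simp only [if_neg h1]
          by_cases h2 : (k : Int) = lo
          · simp only [if_pos h2]
            rw [h2]
            ring
          · simp only [if_neg h2]
            ring
      · simp only [if_neg hc]
        refine pvMk_ext (fun k hk => ?_)
        simp only [pvDelta, ← hlomax, ← hhimin, if_neg hc]
        ring
    rw [hstep, ih]
    refine pvMk_ext (fun k hk => ?_)
    simp only [pvC, List.map_cons, List.sum_cons]
    ring

-- B's sweep computes prefix sums and counts the zero ones
lemma pvSweep (g : Int → Int) (n : Nat) (hn : n ≤ 100) :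
    (PySem.List.pyRange 0 (n : Int) 1).foldl
      (fun (p : Int × Int) j =>
        let cur := p.1 + PySem.List.pyGetD (pvMk 101 g) j 0
        (cur, if cur = 0 then p.2 + 1 else p.2)) ((0 : Int), (0 : Int))
    = (pvS g n, ((List.range n).countP (fun k => decide (pvS g (k + 1) = 0)) : Int)) := by
  induction n with
  | zero =>
    rw [PySem.List.pyRange_one_eq_nil (by omega)]
    simp [pvS]
  | succ m ih =>
    have hm : m ≤ 100 := by omega
    have hcast : ((m + 1 : Nat) : Int) = (m : Int) + 1 := by push_cast; ring
    rw [hcast, PySem.List.pyRange_one_succ_right (by omega), List.foldl_append, ih hm]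
    simp only [List.foldl_cons, List.foldl_nil]
    rw [pvMk_pyGetD g (m : Int) 0 (by omega) (by omega)]
    have hsum : pvS g m + g (m : Int) = pvS g (m + 1) := by
      simp [pvS, List.range_succ]
    rw [hsum]
    have hcnt : (List.range (m + 1)).countP (fun k => decide (pvS g (k + 1) = 0))
        = (List.range m).countP (fun k => decide (pvS g (k + 1) = 0))
          + if pvS g (m + 1) = 0 then 1 else 0 := by
      rw [List.range_succ, List.countP_append]
      simp [List.countP_cons]
    rw [hcnt]
    split_ifs with h <;> simp [h]

-- per-cop prefix sum of pvDelta is the coverage indicator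
lemma pvPerElem (d w : Int) (k : Nat) (hk : k < 100) :
    ((List.range (k + 1)).map (fun j : Nat => pvDelta d w (j : Int))).sum
    = if pvCov d (k : Int) w then 1 else 0 := by
  by_cases hc : max (w - d - 1) 0 ≤ min (w + d - 1) 99
  · have : ((List.range (k + 1)).map (fun j : Nat => pvDelta d w (j : Int))).sum
        = ((List.range (k + 1)).map (fun j : Nat =>
            (if (j : Int) = max (w - d - 1) 0 then (1:Int) else 0)
            - (if (j : Int) = min (w + d - 1) 99 + 1 then (1:Int) else 0))).sum := by
      refine congrArg List.sum (List.map_congr_left (fun j hj => ?_))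
      simp only [pvDelta, if_pos hc]
    rw [this, pvSumSub, pvSumInd, pvSumInd]
    simp only [pvCov, decide_eq_true_eq]
    split_ifs <;> omega
  · have : ((List.range (k + 1)).map (fun j : Nat => pvDelta d w (j : Int))).sum
        = ((List.range (k + 1)).map (fun _ : Nat => (0:Int))).sum := by
      refine congrArg List.sum (List.map_congr_left (fun j hj => ?_))
      simp only [pvDelta, if_neg hc]
    rw [this]
    have hnc : ¬ pvCov d (k : Int) w = true := by
      simp only [pvCov, decide_eq_true_eq]
      omega
    simp [hnc]

-- exchange the sum over slots with the sum over cops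
lemma pvSwap (d : Int) (a : List Int) (n : Nat) :
    pvS (pvC d a) n
    = (a.map (fun w => ((List.range n).map (fun j : Nat => pvDelta d w (j : Int))).sum)).sum := by
  induction a with
  | nil => simp [pvS, pvC]
  | cons w a ih =>
    simp only [List.map_cons, List.sum_cons, ← ih]
    have : pvS (pvC d (w :: a)) n
        = ((List.range n).map (fun k : Nat =>
            pvDelta d w (k : Int) + pvC d a (k : Int))).sum := by
      refine congrArg List.sum (List.map_congr_left (fun j hj => ?_))
      simp [pvC]
    rw [this, PySem.List.sum_map_add_int]
    rfl

-- the prefix sum at slot k is the number of cops covering k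
lemma pvPrefixCount (d : Int) (a : List Int) (k : Nat) (hk : k < 100) :
    pvS (pvC d a) (k + 1) = (a.countP (pvCov d (k : Int)) : Int) := by
  rw [pvSwap]
  have : (a.map (fun w => ((List.range (k + 1)).map (fun j : Nat => pvDelta d w (j : Int))).sum))
      = a.map (fun w => if pvCov d (k : Int) w then (1:Int) else 0) := by
    refine List.map_congr_left (fun w hw => ?_)
    exact pvPerElem d w k hk
  rw [this]
  exact PySem.List.sum_map_ite_one_zero (pvCov d (k : Int)) a

-- initial lists of the two ports
lemma pvInitA : PySem.List.pyRange 1 101 1 = pvMk 100 (fun r => r + 1) := by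
  rw [PySem.List.pyRange_one]
  refine List.map_congr_left (fun k hk => ?_)
  show (1 : Int) + (k : Int) = (k : Int) + 1
  ring

lemma pvInitB : List.replicate 101 (0 : Int) = pvMk 101 (fun _ => 0) := by
  simp [pvMk, List.map_const']

-- ===== VERDICT (by name: the statement is the Claim_ definition above) =====
theorem safehouse_spec : Claim_equal_safehouse := by
  intro a x y _
  unfold Spec_safehouse safehouse safehouse_alt
  simp only []
  rw [pvInitA, pvInitB, pvAfold (x * y) a, pvBfold (x * y) a]
  have hB : pvMk 101 (fun j => 0 + pvC (x * y) a j) = pvMk 101 (pvC (x * y) a) :=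
    pvMk_ext (fun k hk => by ring)
  rw [hB]
  have h100 : (100 : Int) = ((100 : Nat) : Int) := by norm_num
  rw [h100, pvSweep (pvC (x * y) a) 100 (le_refl _)]
  -- LHS: 100 - count of zeros in A's final list
  have hcnt : PySem.List.count (pvMk 100 (fun r => if a.any (pvCov (x * y) r) then 0 else r + 1)) 0
      = (List.range 100).countP (fun k : Nat => a.any (pvCov (x * y) (k : Int))) := by
    rw [PySem.List.count_eq, List.count_eq_countP, pvMk]
    rw [List.countP_map]
    refine List.countP_congr (fun k hk => ?_)
    simp only [Function.comp]
    by_cases h : a.any (pvCov (x * y) (k : Int)) = true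
    · simp [h]
    · simp [h]
      omega
  rw [hcnt]
  -- RHS: count of slots whose coverage count is zero
  have hzero : (List.range 100).countP (fun k => decide (pvS (pvC (x * y) a) (k + 1) = 0))
      = (List.range 100).countP (fun k : Nat => !(a.any (pvCov (x * y) (k : Int)))) := by
    refine List.countP_congr (fun k hk => ?_)
    have hk' : k < 100 := List.mem_range.mp hk
    rw [pvPrefixCount (x * y) a k hk']
    simp only [decide_eq_true_eq, Bool.not_eq_true']
    constructor
    · intro h
      have : a.countP (pvCov (x * y) (k : Int)) = 0 := by exact_mod_cast h
      rw [List.countP_eq_zero] at this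
      simp only [List.any_eq_false]
      intro w hw
      exact fun hb => this w hw hb
    · intro h
      have : a.countP (pvCov (x * y) (k : Int)) = 0 := by
        rw [List.countP_eq_zero]
        intro w hw
        simp only [List.any_eq_false] at h
        exact h w hw
      exact_mod_cast this
  rw [hzero]
  have hsplit := List.length_eq_countP_add_countP (fun k : Nat => a.any (pvCov (x * y) (k : Int)))
      (l := List.range 100)
  simp only [List.length_range] at hsplit
  have : (List.range 100).countP (fun k : Nat => !(a.any (pvCov (x * y) (k : Int))))
      = (List.range 100).countP (fun k : Nat => decide ¬ (a.any (pvCov (x * y) (k : Int))) = true) := by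
    refine List.countP_congr (fun k hk => ?_)
    simp
  rw [this]
  omega
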